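-- pv_equiv track=rewrite | github.com/Avicii4/LeetCode | Python/exam/xhs-1.py | is_repeat
-- ===== SOURCE A (Python) =====
-- from collections import Counter
--
-- def is_repeat(arr):
--     n = len(arr)
--     for i in range(n):
--         if (n - i) % 2 == 1:
--             continue
--         else:
--             half = (n - i) // 2
--             a = ''.join(arr[i:i + half])
--             b = ''.join(arr[i + half:])
--             if a == b and len(set(a)) > 1:
--                 cnt =Counter(a)
--                 if cnt['R']==cnt['L'] and cnt['D']==cnt['U']:
--                     return True
--     return False
-- ===== SOURCE B (Python) =====
-- def _zfunc(s):
--     # classic Z-algorithm: z[k] = length of longest common prefix of s and s[k:]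
--     n = len(s)
--     z = [0] * n
--     l = r = 0
--     for k in range(1, n):
--         if k < r:
--             z[k] = min(r - k, z[k - l])
--         while k + z[k] < n and s[z[k]] == s[k + z[k]]:
--             z[k] += 1
--         if k + z[k] > r:
--             l, r = k, k + z[k]
--     return z
--
--
-- def _pref(S, c):
--     # out[j] = number of occurrences of c in S[:j]
--     out = [0]
--     for ch in S:
--         out.append(out[-1] + (ch == c))
--     return out
--
--
-- def is_repeat(arr):
--     # O(n + |S|): join once, Z-array of the reversed string decides half-equality
--     # in O(1) per split point; prefix sums decide the count conditions in O(1).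
--     n = len(arr)
--     pos = [0]
--     for s in arr:
--         pos.append(pos[-1] + len(s))
--     S = ''.join(arr)
--     L = len(S)
--     z = _zfunc(S[::-1])
--     cR, cL, cD, cU = _pref(S, 'R'), _pref(S, 'L'), _pref(S, 'D'), _pref(S, 'U')
--     # nxt[j] = smallest t > j with S[t] != S[j], or L if none
--     nxt = [L] * L
--     for j in range(L - 2, -1, -1):
--         nxt[j] = j + 1 if S[j + 1] != S[j] else nxt[j + 1]
--     for i in range(n % 2, n, 2):
--         mid = (i + n) // 2
--         p, m = pos[i], pos[mid]
--         h = L - m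
--         if m - p != h:
--             continue
--         if h >= 1 and z[h] < h:
--             continue
--         if not (p < m and nxt[p] < m):
--             continue
--         if cR[m] - cR[p] == cL[m] - cL[p] and cD[m] - cD[p] == cU[m] - cU[p]:
--             return True
--     return False
-- ===== Notes on version B (the rewrite author's own statement) =====
-- stated objective: faster
-- what changed: B joins the array once and precomputes element-boundary offsets, a Z-array of the reversed join (so each half-equality test is one O(1) array lookup instead of building and comparing two joined strings), prefix sums of the R/L/D/U counts, and a next-different-character table, then decides every split point in O(1).
import Mathlib
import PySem

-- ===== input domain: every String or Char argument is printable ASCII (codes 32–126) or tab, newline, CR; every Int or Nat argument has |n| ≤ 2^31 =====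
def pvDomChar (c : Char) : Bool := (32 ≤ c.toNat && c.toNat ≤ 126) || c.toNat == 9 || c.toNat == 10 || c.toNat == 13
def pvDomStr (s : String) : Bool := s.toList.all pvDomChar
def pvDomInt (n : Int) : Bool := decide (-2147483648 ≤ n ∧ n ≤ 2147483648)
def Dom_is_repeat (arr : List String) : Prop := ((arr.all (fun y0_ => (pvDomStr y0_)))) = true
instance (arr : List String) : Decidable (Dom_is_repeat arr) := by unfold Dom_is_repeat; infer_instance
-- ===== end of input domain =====

-- B joins the array once and decides each split point in O(1): a Z-array of the
-- reversed join answers the half-equality, prefix sums answer the count tests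
-- (objective: faster, O(n + |S|) instead of A's O(n·|S|)).

-- ===== PORT A =====
-- the 'for i in range(n): ... return True ...' loop; early return = recursion on the index list
def isRepeatLoopA (arr : List String) (n : Int) : List Int → Bool
  | [] => false
  | i :: rest =>
    if PySem.Int.mod (n - i) 2 == 1 then isRepeatLoopA arr n rest
    else
      let half := PySem.Int.floordiv (n - i) 2
      let a := PySem.Str.join "" (PySem.List.slice arr (some i) (some (i + half)))
      let b := PySem.Str.join "" (PySem.List.slice arr (some (i + half)) none)
      if a == b && decide (1 < PySem.Set.len (PySem.Set.ofList a.toList)) then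
        let cnt := PySem.Dict.counter a.toList
        if cnt.getD 'R' 0 == cnt.getD 'L' 0 && cnt.getD 'D' 0 == cnt.getD 'U' 0 then
          true
        else isRepeatLoopA arr n rest
      else isRepeatLoopA arr n rest

def is_repeat (arr : List String) : Bool :=
  let n : Int := PySem.List.len arr
  isRepeatLoopA arr n (PySem.List.pyRange 0 n 1)

-- ===== PORT B =====
-- the 'while' of _zfunc: extend z[k] while characters match (both indices are in
-- range whenever the guard holds, so getD is exact)
def zExt (s : List Char) (n k : Nat) (j : Nat) : Nat :=
  if h : k + j < n ∧ s.getD j ' ' = s.getD (k + j) ' ' then zExt s n k (j + 1) else j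
termination_by n - (k + j)
decreasing_by omega

-- one iteration of _zfunc's 'for k in range(1, n)' (state: the z list and the window l, r);
-- in the else branch z[k] still holds its initial 0
def zStep (s : List Char) (n : Nat) (st : List Nat × Nat × Nat) (k : Nat) : List Nat × Nat × Nat :=
  let j0 := if k < st.2.2 then min (st.2.2 - k) (st.1.getD (k - st.2.1) 0) else 0
  let j := zExt s n k j0
  (st.1.set k j, if st.2.2 < k + j then (k, k + j) else (st.2.1, st.2.2))

def zfunc (s : List Char) : List Nat :=
  ((List.range' 1 (s.length - 1)).foldl (zStep s s.length) (List.replicate s.length 0, 0, 0)).1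

-- pos.append(pos[-1] + len(s))
def posList (arr : List String) : List Int :=
  arr.foldl (fun acc s => acc ++ [PySem.List.pyGetD acc (-1) 0 + PySem.Str.len s]) [0]

-- _pref: out.append(out[-1] + (ch == c))
def prefC (S : List Char) (c : Char) : List Int :=
  S.foldl (fun out ch => out ++ [PySem.List.pyGetD out (-1) 0 + (if ch = c then 1 else 0)]) [0]

-- nxt[j] = j+1 if S[j+1] != S[j] else nxt[j+1], filled by the backward range loop
def nxtList (S : List Char) : List Int :=
  (PySem.List.pyRange ((S.length : Int) - 2) (-1) (-1)).foldl
    (fun v j =>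
      PySem.List.pySetD v j
        (if ¬ (PySem.List.pyGetD S (j + 1) ' ' = PySem.List.pyGetD S j ' ') then j + 1
         else PySem.List.pyGetD v (j + 1) 0))
    (List.replicate S.length (S.length : Int))

-- the candidate loop 'for i in range(n % 2, n, 2)' with its continue/return structure
def isRepeatLoopB (pos cRl cLl cDl cUl nxt : List Int) (z : List Nat) (L n : Int) :
    List Int → Bool
  | [] => false
  | i :: rest =>
    let mid := PySem.Int.floordiv (i + n) 2
    let p := PySem.List.pyGetD pos i 0
    let m := PySem.List.pyGetD pos mid 0
    let h := L - m
    if ¬ (m - p = h) then isRepeatLoopB pos cRl cLl cDl cUl nxt z L n rest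
    else if 1 ≤ h ∧ ((z.getD h.toNat 0 : Int) < h) then
      isRepeatLoopB pos cRl cLl cDl cUl nxt z L n rest
    else if ¬ (p < m ∧ PySem.List.pyGetD nxt p 0 < m) then
      isRepeatLoopB pos cRl cLl cDl cUl nxt z L n rest
    else if PySem.List.pyGetD cRl m 0 - PySem.List.pyGetD cRl p 0
              = PySem.List.pyGetD cLl m 0 - PySem.List.pyGetD cLl p 0
            ∧ PySem.List.pyGetD cDl m 0 - PySem.List.pyGetD cDl p 0
              = PySem.List.pyGetD cUl m 0 - PySem.List.pyGetD cUl p 0 then true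
    else isRepeatLoopB pos cRl cLl cDl cUl nxt z L n rest

def is_repeat_alt (arr : List String) : Bool :=
  let n : Int := PySem.List.len arr
  let pos := posList arr
  let S := PySem.Str.join "" arr
  let L : Int := PySem.Str.len S
  -- S[::-1] is the reversed string (PySem.Str.slice?_none_none_neg_one)
  let z := zfunc S.toList.reverse
  isRepeatLoopB pos (prefC S.toList 'R') (prefC S.toList 'L') (prefC S.toList 'D')
    (prefC S.toList 'U') (nxtList S.toList) z L n
    (PySem.List.pyRange (PySem.Int.mod n 2) n 2)

-- ===== PRECONDITION & SPEC =====
def Spec_is_repeat (arr : List String) (out : Bool) : Prop := out = is_repeat_alt arr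
instance (arr : List String) (out : Bool) : Decidable (Spec_is_repeat arr out) := by unfold Spec_is_repeat; infer_instance

-- ===== CLAIM (what is proved, stated in full; the proofs are below) =====
def Claim_equal_is_repeat : Prop := ∀ (arr : List String), Dom_is_repeat arr → Spec_is_repeat arr (is_repeat arr)

-- ===== LEMMAS AND PROOFS =====

-- proof-side helpers ------------------------------------------------------

-- longest common prefix of two char lists
def lcp : List Char → List Char → Nat
  | a :: as, b :: bs => if a = b then lcp as bs + 1 else 0
  | _, _ => 0

def lcpAt (s : List Char) (k : Nat) : Nat := lcp s (s.drop k)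

-- total char length of the first i elements
def lenPre (arr : List String) (i : Nat) : Nat := ((arr.take i).map (fun s => s.toList.length)).sum

def flatT (arr : List String) : List Char := (arr.map String.toList).flatten

-- first index t > p with T[t] ≠ T[p] (else T.length)
def nxtSpec (T : List Char) (p : Nat) : Nat :=
  if _h : p + 1 < T.length then
    (if T.getD (p + 1) ' ' ≠ T.getD p ' ' then p + 1 else nxtSpec T (p + 1))
  else T.length
termination_by T.length - p

def condA (arr : List String) (n i : Int) : Bool :=
  if PySem.Int.mod (n - i) 2 == 1 then false
  else
    let half := PySem.Int.floordiv (n - i) 2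
    let a := PySem.Str.join "" (PySem.List.slice arr (some i) (some (i + half)))
    let b := PySem.Str.join "" (PySem.List.slice arr (some (i + half)) none)
    if a == b && decide (1 < PySem.Set.len (PySem.Set.ofList a.toList)) then
      if (PySem.Dict.counter a.toList).getD 'R' 0 == (PySem.Dict.counter a.toList).getD 'L' 0 &&
         (PySem.Dict.counter a.toList).getD 'D' 0 == (PySem.Dict.counter a.toList).getD 'U' 0 then
        true
      else false
    else false

def condB (pos cRl cLl cDl cUl nxt : List Int) (z : List Nat) (L n i : Int) : Bool :=
  let mid := PySem.Int.floordiv (i + n) 2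
  let p := PySem.List.pyGetD pos i 0
  let m := PySem.List.pyGetD pos mid 0
  let h := L - m
  if ¬ (m - p = h) then false
  else if 1 ≤ h ∧ ((z.getD h.toNat 0 : Int) < h) then false
  else if ¬ (p < m ∧ PySem.List.pyGetD nxt p 0 < m) then false
  else if PySem.List.pyGetD cRl m 0 - PySem.List.pyGetD cRl p 0
            = PySem.List.pyGetD cLl m 0 - PySem.List.pyGetD cLl p 0
          ∧ PySem.List.pyGetD cDl m 0 - PySem.List.pyGetD cDl p 0
            = PySem.List.pyGetD cUl m 0 - PySem.List.pyGetD cUl p 0 then true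
  else false

-- loops = any over the index list -----------------------------------------

theorem loopA_eq_any (arr : List String) (n : Int) (is : List Int) :
    isRepeatLoopA arr n is = is.any (condA arr n) := by
  induction is with
  | nil => rfl
  | cons i rest ih =>
    simp only [isRepeatLoopA, List.any_cons, ih, condA]
    split_ifs <;> simp

theorem loopB_eq_any (pos cRl cLl cDl cUl nxt : List Int) (z : List Nat) (L n : Int)
    (is : List Int) :
    isRepeatLoopB pos cRl cLl cDl cUl nxt z L n is
      = is.any (condB pos cRl cLl cDl cUl nxt z L n) := by
  induction is with
  | nil => rfl
  | cons i rest ih =>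
    simp only [isRepeatLoopB, List.any_cons, ih, condB]
    split_ifs <;> simp

-- lcp ----------------------------------------------------------------------

theorem lcp_le_right (a b : List Char) : lcp a b ≤ b.length := by
  induction a generalizing b with
  | nil => cases b <;> simp [lcp]
  | cons x as ih =>
    cases b with
    | nil => simp [lcp]
    | cons y bs =>
      simp only [lcp, List.length_cons]
      split_ifs
      · have := ih bs; omega
      · omega

theorem le_lcp_iff (a b : List Char) (j : Nat) :
    j ≤ lcp a b ↔ j ≤ a.length ∧ j ≤ b.length ∧ ∀ t, t < j → a[t]? = b[t]? := by
  induction a generalizing b j with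
  | nil =>
    constructor
    · intro h
      have hj : j = 0 := by cases b <;> simpa [lcp] using h
      subst hj; simp
    · rintro ⟨h1, -, -⟩
      have hj : j = 0 := by simpa using h1
      subst hj
      cases b <;> simp [lcp]
  | cons x as ih =>
    cases b with
    | nil =>
      constructor
      · intro h
        have hj : j = 0 := by simpa [lcp] using h
        subst hj; simp
      · rintro ⟨-, h2, -⟩
        have hj : j = 0 := by simpa using h2
        subst hj
        simp [lcp]
    | cons y bs =>
      cases j with
      | zero => simp
      | succ j' =>
        simp only [lcp, List.length_cons]
        split_ifs with hxy
        · subst hxy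
          rw [Nat.succ_le_succ_iff, ih bs j']
          constructor
          · rintro ⟨h1, h2, h3⟩
            refine ⟨by omega, by omega, ?_⟩
            intro t ht
            cases t with
            | zero => simp
            | succ t' => simpa using h3 t' (by omega)
          · rintro ⟨h1, h2, h3⟩
            refine ⟨by omega, by omega, ?_⟩
            intro t ht
            simpa using h3 (t + 1) (by omega)
        · constructor
          · omega
          · rintro ⟨-, -, h3⟩
            have := h3 0 (by omega)
            simp at this
            exact absurd this hxy

theorem lcp_block (a b : List Char) (ha : lcp a b < a.length) (hb : lcp a b < b.length) :
    a[lcp a b]? ≠ b[lcp a b]? := by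
  intro heq
  have : lcp a b + 1 ≤ lcp a b := by
    rw [le_lcp_iff]
    refine ⟨by omega, by omega, ?_⟩
    intro t ht
    rcases Nat.lt_or_ge t (lcp a b) with h | h
    · exact ((le_lcp_iff a b (lcp a b)).mp le_rfl).2.2 t h
    · have : t = lcp a b := by omega
      subst this; exact heq
  omega

-- Z-function ----------------------------------------------------------------

theorem getD_eq_iff_getElem?_eq (s : List Char) (u v : Nat) (hu : u < s.length)
    (hv : v < s.length) : (s.getD u ' ' = s.getD v ' ') ↔ s[u]? = s[v]? := by
  rw [List.getD_eq_getElem?_getD, List.getD_eq_getElem?_getD,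
      List.getElem?_eq_getElem hu, List.getElem?_eq_getElem hv]
  simp

theorem zExt_correct (s : List Char) (k j : Nat) (hk : 1 ≤ k)
    (hj : j ≤ lcpAt s k) : zExt s s.length k j = lcpAt s k := by
  have hW2 : lcpAt s k ≤ s.length - k := by
    have := lcp_le_right s (s.drop k)
    simpa [lcpAt] using this
  have main : ∀ m j, j ≤ lcpAt s k → lcpAt s k - j = m → zExt s s.length k j = lcpAt s k := by
    intro m
    induction m with
    | zero =>
      intro j hj hm
      have hjW : j = lcpAt s k := by omega
      subst hjW
      rw [zExt]
      split
      · next h =>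
        exfalso
        have hlt : lcpAt s k < s.length - k := by omega
        have hlt2 : lcpAt s k < s.length := by omega
        have hblock := lcp_block s (s.drop k) hlt2 (by simpa using hlt)
        rw [List.getElem?_drop] at hblock
        exact hblock ((getD_eq_iff_getElem?_eq s (lcpAt s k) (k + lcpAt s k) hlt2 h.1).mp h.2)
      · rfl
    | succ m ih =>
      intro j hj hm
      have hjlt : j < lcpAt s k := by omega
      have hrange : k + j < s.length := by omega
      have hchars : s.getD j ' ' = s.getD (k + j) ' ' := by
        have hall := ((le_lcp_iff s (s.drop k) (lcpAt s k)).mp le_rfl).2.2 j hjlt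
        rw [List.getElem?_drop] at hall
        exact (getD_eq_iff_getElem?_eq s j (k + j) (by omega) hrange).mpr hall
      rw [zExt, dif_pos ⟨hrange, hchars⟩]
      exact ih (j + 1) (by omega) (by omega)
  exact main (lcpAt s k - j) j hj rfl

-- invariant of the outer fold
def ZInv (s : List Char) (k : Nat) (st : List Nat × Nat × Nat) : Prop :=
  st.1.length = s.length ∧ st.2.2 ≤ s.length ∧
  (∀ j, 1 ≤ j → j < k → st.1.getD j 0 = lcpAt s j) ∧
  (st.2.2 ≤ k ∨ (1 ≤ st.2.1 ∧ st.2.1 < k ∧ st.2.2 - st.2.1 ≤ lcpAt s st.2.1))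

theorem zStep_inv (s : List Char) (k : Nat) (st : List Nat × Nat × Nat)
    (hk : 1 ≤ k) (hkn : k < s.length) (h : ZInv s k st) :
    ZInv s (k + 1) (zStep s s.length st k) := by
  obtain ⟨hlen, hrn, hz, hwin⟩ := h
  have hlcp_len : lcpAt s k ≤ s.length - k := by
    have := lcp_le_right s (s.drop k)
    simpa [lcpAt] using this
  have hj0 : (if k < st.2.2 then min (st.2.2 - k) (st.1.getD (k - st.2.1) 0) else 0)
      ≤ lcpAt s k := by
    split
    · next hkr =>
      rcases hwin with hw | ⟨hl1, hlk, hwl⟩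
      · omega
      · have hzkl : st.1.getD (k - st.2.1) 0 = lcpAt s (k - st.2.1) :=
          hz _ (by omega) (by omega)
        rw [hzkl]
        rw [show lcpAt s k = lcp s (s.drop k) from rfl, le_lcp_iff]
        refine ⟨by omega, by simp; omega, ?_⟩
        intro t ht
        have h1 : t < lcpAt s (k - st.2.1) := by omega
        have h2 : t < st.2.2 - k := by omega
        have e1 := ((le_lcp_iff s (s.drop (k - st.2.1)) _).mp le_rfl).2.2 t h1
        rw [List.getElem?_drop] at e1
        have e2 := ((le_lcp_iff s (s.drop st.2.1) _).mp hwl).2.2 (k - st.2.1 + t) (by omega)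
        rw [List.getElem?_drop] at e2
        rw [List.getElem?_drop]
        have ha : st.2.1 + (k - st.2.1 + t) = k + t := by omega
        rw [ha] at e2
        exact e1.trans e2
    · omega
  have hje : zExt s s.length k
      (if k < st.2.2 then min (st.2.2 - k) (st.1.getD (k - st.2.1) 0) else 0) = lcpAt s k :=
    zExt_correct s k _ hk hj0
  refine ⟨by simp [zStep, hlen], ?_, ?_, ?_⟩
  · simp only [zStep, hje]
    split
    · simp; omega
    · simpa using hrn
  · intro j hj1 hj2
    simp only [zStep, hje]
    rw [List.getD_eq_getElem?_getD, List.getElem?_set]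
    by_cases hjk : j = k
    · subst hjk
      simp [hlen, hkn]
    · rw [if_neg (by omega), ← List.getD_eq_getElem?_getD]
      exact hz j hj1 (by omega)
  · simp only [zStep, hje]
    split
    · right
      exact ⟨hk, by omega, by simp⟩
    · next hr =>
      rcases hwin with hw | ⟨hl1, hlk, hwl⟩
      · left; omega
      · right; exact ⟨hl1, by omega, hwl⟩

theorem zfold_inv (s : List Char) (cnt : Nat) : ∀ (a : Nat) (st : List Nat × Nat × Nat),
    1 ≤ a → a + cnt ≤ s.length → ZInv s a st →
    ZInv s (a + cnt) ((List.range' a cnt).foldl (zStep s s.length) st) := by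
  induction cnt with
  | zero => intro a st _ _ h; simpa using h
  | succ m ih =>
    intro a st ha hle h
    rw [List.range'_succ, List.foldl_cons]
    have := ih (a + 1) (zStep s s.length st a) (by omega) (by omega)
      (zStep_inv s a st ha (by omega) h)
    have he : a + 1 + m = a + (m + 1) := by omega
    rwa [he] at this

theorem zfunc_correct (s : List Char) (h : Nat) (h1 : 1 ≤ h) (h2 : h < s.length) :
    (zfunc s).getD h 0 = lcpAt s h := by
  have hinv0 : ZInv s 1 (List.replicate s.length 0, 0, 0) := by
    refine ⟨by simp, by simp, ?_, by left; simp⟩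
    intro j hj1 hj2
    omega
  have hcc : 1 + (s.length - 1) ≤ s.length := by omega
  have hfin := zfold_inv s (s.length - 1) 1 (List.replicate s.length 0, 0, 0) le_rfl hcc hinv0
  have he : 1 + (s.length - 1) = s.length := by omega
  rw [he] at hfin
  exact hfin.2.2.1 h h1 h2

-- pos / prefix counts -------------------------------------------------------

theorem posList_eq (arr : List String) :
    posList arr = (List.range (arr.length + 1)).map (fun k => (lenPre arr k : Int)) := by
  induction arr using List.reverseRecOn with
  | nil => simp [posList, lenPre]
  | append_singleton t x ih =>
    rw [posList, List.foldl_append, List.foldl_cons, List.foldl_nil]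
    have hpt : t.foldl (fun acc s => acc ++ [PySem.List.pyGetD acc (-1) 0 + PySem.Str.len s]) [0]
        = posList t := rfl
    rw [hpt, ih]
    have hlast : PySem.List.pyGetD
        (List.map (fun k => (lenPre t k : Int)) (List.range (t.length + 1))) (-1) 0
        = (lenPre t t.length : Int) := by
      rw [List.range_succ, List.map_append, List.map_singleton,
        PySem.List.pyGetD_neg_one_append_singleton]
    have hlen : (t ++ [x]).length = t.length + 1 := by simp
    rw [hlast, hlen, List.range_succ (n := t.length + 1), List.map_append, List.map_singleton]
    congr 1
    · apply List.map_congr_left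
      intro k hk
      simp only [List.mem_range] at hk
      have : (t ++ [x]).take k = t.take k := List.take_append_of_le_length (by omega)
      simp [lenPre, this]
    · have h1 : (t ++ [x]).take (t.length + 1) = t ++ [x] := by
        apply List.take_of_length_le; simp
      have h2 : t.take t.length = t := List.take_length
      simp [lenPre, h1, h2, PySem.Str.len_eq]

theorem prefC_eq (S : List Char) (c : Char) :
    prefC S c = (List.range (S.length + 1)).map (fun k => (((S.take k).count c : Nat) : Int)) := by
  induction S using List.reverseRecOn with
  | nil => simp [prefC]
  | append_singleton t x ih =>
    rw [prefC, List.foldl_append, List.foldl_cons, List.foldl_nil]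
    have hpt : t.foldl (fun out ch => out ++ [PySem.List.pyGetD out (-1) 0 + (if ch = c then 1 else 0)]) [0]
        = prefC t c := rfl
    rw [hpt, ih]
    have hlast : PySem.List.pyGetD
        (List.map (fun k => ((List.count c (t.take k) : Nat) : Int)) (List.range (t.length + 1))) (-1) 0
        = ((List.count c (t.take t.length) : Nat) : Int) := by
      rw [List.range_succ, List.map_append, List.map_singleton,
        PySem.List.pyGetD_neg_one_append_singleton]
    have hlen : (t ++ [x]).length = t.length + 1 := by simp
    rw [hlast, hlen, List.range_succ (n := t.length + 1), List.map_append, List.map_singleton]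
    congr 1
    · apply List.map_congr_left
      intro k hk
      simp only [List.mem_range] at hk
      have : (t ++ [x]).take k = t.take k := List.take_append_of_le_length (by omega)
      simp [this]
    · have h1 : (t ++ [x]).take (t.length + 1) = t ++ [x] := by
        apply List.take_of_length_le; simp
      have h2 : t.take t.length = t := List.take_length
      rw [h1, h2, List.count_append]
      simp [List.count_singleton]

-- nxt -----------------------------------------------------------------------

theorem nxtSpec_gt (T : List Char) (p : Nat) (hp : p < T.length) : p < nxtSpec T p := by
  have main : ∀ m p, T.length - p ≤ m → p < T.length → p < nxtSpec T p := by
    intro m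
    induction m with
    | zero => intro p h1 h2; omega
    | succ m ih =>
      intro p h1 h2
      rw [nxtSpec]
      by_cases hb : p + 1 < T.length
      · rw [dif_pos hb]
        split
        · omega
        · have := ih (p + 1) (by omega) (by omega); omega
      · rw [dif_neg hb]; omega
  exact main (T.length - p) p le_rfl hp

theorem nxtSpec_ne (T : List Char) (p : Nat) (hp : p < T.length) (h : nxtSpec T p < T.length) :
    T[nxtSpec T p]? ≠ T[p]? := by
  have main : ∀ m p, T.length - p ≤ m → p < T.length → nxtSpec T p < T.length →
      T[nxtSpec T p]? ≠ T[p]? := by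
    intro m
    induction m with
    | zero => intro p h1 h2 h3; omega
    | succ m ih =>
      intro p h1 h2 h3
      rw [nxtSpec] at h3 ⊢
      by_cases hb : p + 1 < T.length
      · rw [dif_pos hb] at h3 ⊢
        split at h3
        · next hne =>
          rw [if_pos hne]
          exact fun he => hne ((getD_eq_iff_getElem?_eq T (p + 1) p hb h2).mpr he)
        · next hne =>
          rw [if_neg hne]
          push_neg at hne
          have heq : T[p + 1]? = T[p]? := (getD_eq_iff_getElem?_eq T (p + 1) p hb h2).mp hne
          have := ih (p + 1) (by omega) hb h3
          rw [heq] at this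
          exact this
      · rw [dif_neg hb] at h3; omega
  exact main (T.length - p) p le_rfl hp h

theorem nxtSpec_eq_between (T : List Char) (p t : Nat) (h1 : p < t) (h2 : t < nxtSpec T p)
    (h3 : t < T.length) : T[t]? = T[p]? := by
  have main : ∀ m p t, T.length - p ≤ m → p < t → t < nxtSpec T p → t < T.length →
      T[t]? = T[p]? := by
    intro m
    induction m with
    | zero =>
      intro p t ha hb hc hd
      rw [nxtSpec] at hc
      by_cases hcase : p + 1 < T.length
      · omega
      · rw [dif_neg hcase] at hc; omega
    | succ m ih =>
      intro p t ha hb hc hd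
      rw [nxtSpec] at hc
      by_cases hcase : p + 1 < T.length
      · rw [dif_pos hcase] at hc
        split at hc
        · omega
        · next hne =>
          push_neg at hne
          have heq : T[p + 1]? = T[p]? :=
            (getD_eq_iff_getElem?_eq T (p + 1) p hcase (by omega)).mp hne
          rcases Nat.eq_or_lt_of_le (Nat.succ_le_of_lt hb) with he | hlt
          · subst he; simpa using heq
          · rw [← heq]; exact ih (p + 1) t (by omega) hlt hc hd
      · rw [dif_neg hcase] at hc; omega
  exact main (T.length - p) p t le_rfl h1 h2 h3

theorem nxt_fold (S : List Char) : ∀ (m : Nat) (a : Int) (v : List Int),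
    (a + 1).toNat = m → -1 ≤ a → a ≤ (S.length : Int) - 2 → v.length = S.length →
    (∀ t : Nat, a < (t : Int) → t < S.length → v.getD t 0 = (nxtSpec S t : Int)) →
    ∀ t : Nat, t < S.length →
      ((PySem.List.pyRange a (-1) (-1)).foldl
        (fun v j => PySem.List.pySetD v j
          (if ¬ (PySem.List.pyGetD S (j + 1) ' ' = PySem.List.pyGetD S j ' ') then j + 1
           else PySem.List.pyGetD v (j + 1) 0)) v).getD t 0 = (nxtSpec S t : Int) := by
  intro m
  induction m with
  | zero =>
    intro a v hm ha1 ha2 hlen hv t ht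
    have ha : a = -1 := by omega
    subst ha
    rw [PySem.List.pyRange_neg_one_eq_nil le_rfl, List.foldl_nil]
    exact hv t (by omega) ht
  | succ m ih =>
    intro a v hm ha1 ha2 hlen hv t ht
    have ha0 : 0 ≤ a := by omega
    rw [PySem.List.pyRange_neg_one_cons (by omega), List.foldl_cons]
    apply ih (a - 1) _ (by omega) (by omega) (by omega)
      (by rw [PySem.List.length_pySetD]; exact hlen)
    · intro u hu1 hu2
      rw [PySem.List.pySetD_of_nonneg _ _ ha0]
      by_cases hua : (u : Int) = a
      · have hu : u = a.toNat := by omega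
        subst hu
        rw [List.getD_eq_getElem?_getD, List.getElem?_set, if_pos rfl,
            if_pos (by rw [hlen]; omega)]
        simp only [Option.getD_some]
        have hc1 : a + 1 = ((a.toNat + 1 : Nat) : Int) := by omega
        have hc0 : a = ((a.toNat : Nat) : Int) := by omega
        rw [hc1, hc0, PySem.List.pyGetD_natCast, PySem.List.pyGetD_natCast,
            PySem.List.pyGetD_natCast]
        simp only [Int.toNat_natCast]
        have hvn : v.getD (a.toNat + 1) 0 = (nxtSpec S (a.toNat + 1) : Int) :=
          hv (a.toNat + 1) (by omega) (by omega)
        have hspec : ((nxtSpec S a.toNat : Nat) : Int)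
            = (if ¬ S.getD (a.toNat + 1) ' ' = S.getD a.toNat ' '
               then ((a.toNat + 1 : Nat) : Int) else ((nxtSpec S (a.toNat + 1) : Nat) : Int)) := by
          rw [nxtSpec, dif_pos (by omega : a.toNat + 1 < S.length)]
          simp only [ne_eq]
          split_ifs <;> rfl
        rw [hspec]
        split_ifs with hne
        · exact hvn
        · rfl
      · rw [List.getD_eq_getElem?_getD, List.getElem?_set, if_neg (by omega),
            ← List.getD_eq_getElem?_getD]
        exact hv u (by omega) hu2
    · exact ht

theorem nxtList_eq (S : List Char) (p : Nat) (hp : p < S.length) :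
    PySem.List.pyGetD (nxtList S) (p : Int) 0 = (nxtSpec S p : Int) := by
  rw [PySem.List.pyGetD_natCast, nxtList]
  apply nxt_fold S ((S.length : Int) - 2 + 1).toNat ((S.length : Int) - 2)
    (List.replicate S.length (S.length : Int)) rfl (by omega) le_rfl (by simp)
  · intro t ht1 ht2
    have hteq : t = S.length - 1 := by omega
    subst hteq
    rw [List.getD_eq_getElem?_getD, List.getElem?_replicate, if_pos (by omega)]
    simp only [Option.getD_some]
    rw [nxtSpec, dif_neg (by omega)]
  · exact hp

-- set cardinality -----------------------------------------------------------

theorem set_len_gt_one (w : List Char) :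
    1 < PySem.Set.len (PySem.Set.ofList w) ↔ ∃ x ∈ w, ∃ y ∈ w, x ≠ y := by
  have hlen : PySem.Set.len (PySem.Set.ofList w) = ((PySem.Set.ofList w).length : Int) := by
    simp [PySem.Set.len]
  rw [hlen]
  constructor
  · intro h
    match hm : PySem.Set.ofList w with
    | [] => rw [hm] at h; simp at h
    | [a] => rw [hm] at h; simp at h
    | x :: y :: rest =>
      have hnd := PySem.Set.nodup_ofList w
      rw [hm] at hnd
      have hxy : x ≠ y := by
        simp only [List.nodup_cons, List.mem_cons] at hnd
        tauto
      have hx : x ∈ w := (PySem.Set.mem_ofList w x).mp (by rw [hm]; simp)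
      have hy : y ∈ w := (PySem.Set.mem_ofList w y).mp (by rw [hm]; simp)
      exact ⟨x, hx, y, hy, hxy⟩
  · rintro ⟨x, hx, y, hy, hxy⟩
    have hx' : x ∈ PySem.Set.ofList w := (PySem.Set.mem_ofList w x).mpr hx
    have hy' : y ∈ PySem.Set.ofList w := (PySem.Set.mem_ofList w y).mpr hy
    by_contra hle
    push_neg at hle
    have hle' : (PySem.Set.ofList w).length ≤ 1 := by exact_mod_cast hle
    match hm : PySem.Set.ofList w with
    | [] => rw [hm] at hx'; simp at hx'
    | [a] =>
      rw [hm] at hx' hy'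
      simp at hx' hy'
      exact hxy (hx'.trans hy'.symm)
    | x' :: y' :: rest => rw [hm] at hle'; simp at hle'

-- joins and segments --------------------------------------------------------

theorem joinNil (l : List (List Char)) : PySem.Chars.join [] l = l.flatten := by
  induction l with
  | nil => simp [PySem.Chars.join_nil]
  | cons x t ih =>
    cases t with
    | nil => simp [PySem.Chars.join_singleton]
    | cons y u => rw [PySem.Chars.join_cons_cons]; simp_all

theorem toList_joinStr (l : List String) :
    (PySem.Str.join "" l).toList = (l.map String.toList).flatten := by
  rw [PySem.Str.toList_join]
  exact joinNil _

theorem flat_drop (arr : List String) (i : Nat) :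
    ((arr.drop i).map String.toList).flatten = (flatT arr).drop (lenPre arr i) := by
  have hl : (((arr.take i).map String.toList).flatten).length = lenPre arr i := by
    simp [lenPre, List.length_flatten, Function.comp_def]
  have key : flatT arr
      = ((arr.take i).map String.toList).flatten ++ ((arr.drop i).map String.toList).flatten := by
    rw [flatT, ← List.flatten_append, ← List.map_append, List.take_append_drop]
  rw [key, ← hl, List.drop_left]

theorem lenPre_mono (arr : List String) (i j : Nat) (h : i ≤ j) :
    lenPre arr i ≤ lenPre arr j := by
  unfold lenPre
  conv_rhs => rw [← List.take_append_drop i (arr.take j)]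
  rw [List.take_take, min_eq_left h, List.map_append, List.sum_append]
  omega

theorem lenPre_len (arr : List String) : lenPre arr arr.length = (flatT arr).length := by
  simp [lenPre, flatT, List.length_flatten, Function.comp_def]


-- lookups in the pos / prefix-count tables
theorem posList_getD (arr : List String) (j : Int) (h0 : 0 ≤ j) (h1 : j ≤ (arr.length : Int)) :
    PySem.List.pyGetD (posList arr) j 0 = (lenPre arr j.toNat : Int) := by
  rw [posList_eq, PySem.List.pyGetD_eq_getElem _ _ h0 (by simp; omega)]
  rw [List.getElem_map]
  simp

theorem prefC_getD (S : List Char) (c : Char) (j : Int) (h0 : 0 ≤ j)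
    (h1 : j ≤ (S.length : Int)) :
    PySem.List.pyGetD (prefC S c) j 0 = (((S.take j.toNat).count c : Nat) : Int) := by
  rw [prefC_eq, PySem.List.pyGetD_eq_getElem _ _ h0 (by simp; omega)]
  rw [List.getElem_map]
  simp

-- the two halves are equal iff their lengths match and the Z-value at h covers h
theorem take_eq_drop_take_iff (R : List Char) (h : Nat) (h2 : 2 * h ≤ R.length) :
    (R.take h = (R.drop h).take h) ↔ h ≤ lcp R (R.drop h) := by
  rw [le_lcp_iff]
  constructor
  · intro he
    refine ⟨by omega, by simp; omega, ?_⟩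
    intro t ht
    have := congrArg (fun l => l[t]?) he
    simpa [List.getElem?_take, ht] using this
  · rintro ⟨-, -, hall⟩
    apply List.ext_getElem?
    intro t
    rw [List.getElem?_take, List.getElem?_take]
    by_cases ht : t < h
    · rw [if_pos ht, if_pos ht]
      exact hall t ht
    · rw [if_neg ht, if_neg ht]

theorem halves_iff (T : List Char) (p m : Nat) (hpm : p ≤ m) (hmL : m ≤ T.length) :
    ((T.drop p).take (m - p) = T.drop m) ↔
      (m - p = T.length - m ∧
        T.length - m ≤ lcp T.reverse (T.reverse.drop (T.length - m))) := by
  have hseg : (T.drop p).take (m - p) = (T.take m).drop p := by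
    rw [List.drop_take]
  have hlenA : ((T.drop p).take (m - p)).length = m - p := by simp; omega
  have hrevA : ((T.drop p).take (m - p)).reverse
      = (T.reverse.drop (T.length - m)).take (m - p) := by
    rw [hseg, List.reverse_drop, List.reverse_take]
    simp [min_eq_left hmL]
  have hrevB : (T.drop m).reverse = T.reverse.take (T.length - m) := by
    rw [List.reverse_drop]
  constructor
  · intro he
    have hlen : m - p = T.length - m := by
      have := congrArg List.length he
      rw [hlenA] at this
      simp at this
      omega
    refine ⟨hlen, ?_⟩
    rw [← take_eq_drop_take_iff _ _ (by rw [List.length_reverse]; omega)]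
    have := congrArg List.reverse he
    rw [hrevA, hrevB, hlen] at this
    exact this.symm
  · rintro ⟨hlen, hlcp⟩
    rw [← List.reverse_inj, hrevA, hrevB, hlen]
    exact ((take_eq_drop_take_iff _ _ (by rw [List.length_reverse]; omega)).mpr hlcp).symm

-- membership in the half segment, elementwise
theorem mem_seg_iff (T : List Char) (p k : Nat) (x : Char) :
    x ∈ (T.drop p).take k ↔ ∃ j, j < k ∧ T[p + j]? = some x := by
  rw [List.mem_iff_getElem?]
  constructor
  · rintro ⟨j, hj⟩
    rw [List.getElem?_take] at hj
    split at hj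
    · next hjk => exact ⟨j, hjk, by rwa [List.getElem?_drop] at hj⟩
    · simp at hj
  · rintro ⟨j, hjk, hj⟩
    refine ⟨j, ?_⟩
    rw [List.getElem?_take, if_pos hjk, List.getElem?_drop]
    exact hj

-- the segment has two distinct characters iff nxtSpec lands inside it
theorem distinct_iff (T : List Char) (p m : Nat) (hpm : p ≤ m) (hmL : m ≤ T.length) :
    (∃ x ∈ (T.drop p).take (m - p), ∃ y ∈ (T.drop p).take (m - p), x ≠ y) ↔
      (p < m ∧ nxtSpec T p < m) := by
  constructor
  · rintro ⟨x, hx, y, hy, hxy⟩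
    rw [mem_seg_iff] at hx hy
    obtain ⟨jx, hjx, hgx⟩ := hx
    obtain ⟨jy, hjy, hgy⟩ := hy
    have hplt : p < m := by omega
    refine ⟨hplt, ?_⟩
    by_contra hge
    push_neg at hge
    have hall : ∀ j, j < m - p → T[p + j]? = T[p]? := by
      intro j hj
      rcases Nat.eq_zero_or_pos j with hj0 | hjpos
      · subst hj0; rw [Nat.add_zero]
      · exact nxtSpec_eq_between T p (p + j) (by omega) (by omega) (by omega)
    have h1 := hall jx hjx
    have h2 := hall jy hjy
    rw [hgx] at h1
    rw [hgy] at h2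
    rw [← h1] at h2
    exact hxy (by simpa using h2.symm)
  · rintro ⟨hplt, hnxt⟩
    have hpl : p < T.length := by omega
    have hgt := nxtSpec_gt T p hpl
    have hne := nxtSpec_ne T p hpl (by omega)
    obtain ⟨xp, hxp⟩ : ∃ xp, T[p]? = some xp := ⟨T[p], List.getElem?_eq_getElem hpl⟩
    obtain ⟨xt, hxt⟩ : ∃ xt, T[nxtSpec T p]? = some xt :=
      ⟨T[nxtSpec T p]'(by omega), List.getElem?_eq_getElem (by omega)⟩
    refine ⟨xp, ?_, xt, ?_, ?_⟩
    · rw [mem_seg_iff]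
      exact ⟨0, by omega, by rw [Nat.add_zero]; exact hxp⟩
    · rw [mem_seg_iff]
      refine ⟨nxtSpec T p - p, by omega, ?_⟩
      have : p + (nxtSpec T p - p) = nxtSpec T p := by omega
      rw [this]
      exact hxt
    · intro hxe
      subst hxe
      rw [hxp, hxt] at hne
      exact hne rfl

-- the per-candidate bridge ---------------------------------------------------

set_option maxHeartbeats 1600000 in
theorem condA_eq_condB (arr : List String) (i : Int) (h0 : 0 ≤ i)
    (h1 : i < (arr.length : Int)) (hpar : PySem.Int.mod ((arr.length : Int) - i) 2 = 0) :
    condA arr (arr.length : Int) i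
      = condB (posList arr) (prefC (flatT arr) 'R') (prefC (flatT arr) 'L')
          (prefC (flatT arr) 'D') (prefC (flatT arr) 'U') (nxtList (flatT arr))
          (zfunc (flatT arr).reverse) ((flatT arr).length : Int) (arr.length : Int) i := by
  obtain ⟨q, hq⟩ := (PySem.Int.mod_eq_zero_iff_dvd _ _).mp hpar
  have hq1 : 1 ≤ q := by omega
  have hhalf : PySem.Int.floordiv ((arr.length : Int) - i) 2 = q := by
    rw [PySem.Int.floordiv_eq_ediv_of_pos (by norm_num)]; omega
  have hmid : PySem.Int.floordiv (i + (arr.length : Int)) 2 = i + q := by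
    rw [PySem.Int.floordiv_eq_ediv_of_pos (by norm_num)]; omega
  have hiN : (i.toNat : Int) = i := by omega
  have hmidN : (((i + q).toNat : Nat) : Int) = i + q := by omega
  have hile : i.toNat ≤ (i + q).toNat := by omega
  have hmle : (i + q).toNat ≤ arr.length := by omega
  have hpm : lenPre arr i.toNat ≤ lenPre arr (i + q).toNat := lenPre_mono arr _ _ hile
  have hmL : lenPre arr (i + q).toNat ≤ (flatT arr).length := by
    rw [← lenPre_len]
    exact lenPre_mono arr _ _ hmle
  set T := flatT arr with hT
  set p := lenPre arr i.toNat with hp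
  set m := lenPre arr (i + q).toNat with hm
  have hpL : p ≤ T.length := le_trans hpm hmL
  have hsliceA : PySem.List.slice arr (some i) (some (i + q))
      = (arr.drop i.toNat).take ((i + q).toNat - i.toNat) :=
    PySem.List.slice_toNat arr h0 (by omega)
  have hsliceB : PySem.List.slice arr (some (i + q)) none = arr.drop (i + q).toNat :=
    PySem.List.slice_from arr (by omega)
  have hbT : ((arr.drop (i + q).toNat).map String.toList).flatten = T.drop m := by
    rw [hT, hm, flat_drop]
  have hdecomp : T.drop p
      = (((arr.drop i.toNat).take ((i + q).toNat - i.toNat)).map String.toList).flatten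
        ++ T.drop m := by
    rw [hT, hp, hm, ← flat_drop, ← flat_drop]
    conv_lhs => rw [← List.take_append_drop ((i + q).toNat - i.toNat) (arr.drop i.toNat)]
    rw [List.map_append, List.flatten_append, List.drop_drop]
    have hidx : i.toNat + ((i + q).toNat - i.toNat) = (i + q).toNat := by omega
    rw [hidx]
  have haLen :
      ((((arr.drop i.toNat).take ((i + q).toNat - i.toNat)).map String.toList).flatten).length
        = m - p := by
    have hlen := congrArg List.length hdecomp
    simp only [List.length_drop, List.length_append] at hlen
    omega
  have haT :
      (((arr.drop i.toNat).take ((i + q).toNat - i.toNat)).map String.toList).flatten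
        = (T.drop p).take (m - p) := by
    rw [hdecomp, ← haLen, List.take_left]
  have haL : (PySem.Str.join "" (PySem.List.slice arr (some i) (some (i + q)))).toList
      = (T.drop p).take (m - p) := by
    rw [toList_joinStr, hsliceA, haT]
  have hbL : (PySem.Str.join "" (PySem.List.slice arr (some (i + q)) none)).toList
      = T.drop m := by
    rw [toList_joinStr, hsliceB, hbT]
  have hpos_i : PySem.List.pyGetD (posList arr) i 0 = (p : Int) := by
    rw [posList_getD arr i h0 (by omega), hp]
  have hpos_m : PySem.List.pyGetD (posList arr) (i + q) 0 = (m : Int) := by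
    rw [posList_getD arr _ (by omega) (by omega), hm]
  have hcount : ∀ c : Char,
      PySem.List.pyGetD (prefC T c) ((m : Nat) : Int) 0
        - PySem.List.pyGetD (prefC T c) ((p : Nat) : Int) 0
        = ((List.count c ((T.drop p).take (m - p)) : Nat) : Int) := by
    intro c
    rw [prefC_getD T c _ (by omega) (by exact_mod_cast hmL),
        prefC_getD T c _ (by omega) (by exact_mod_cast hpL)]
    simp only [Int.toNat_natCast]
    have hsplit : T.take m = T.take p ++ (T.drop p).take (m - p) := by
      have : m = p + (m - p) := by omega
      rw [this, List.take_add]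
      congr 2
      omega
    rw [hsplit, List.count_append]
    push_cast
    ring
  -- the A side as a proposition
  have hA : (condA arr (arr.length : Int) i = true) ↔
      ((T.drop p).take (m - p) = T.drop m
        ∧ (∃ x ∈ (T.drop p).take (m - p), ∃ y ∈ (T.drop p).take (m - p), x ≠ y)
        ∧ (List.count 'R' ((T.drop p).take (m - p)) = List.count 'L' ((T.drop p).take (m - p))
           ∧ List.count 'D' ((T.drop p).take (m - p)) = List.count 'U' ((T.drop p).take (m - p)))) := by
    unfold condA
    rw [hpar, hhalf]
    simp only [show ((0 : Int) == 1) = false from rfl, Bool.false_eq_true, if_false]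
    split_ifs with hcnd hcnt
    · simp only [Bool.and_eq_true, beq_iff_eq, decide_eq_true_eq] at hcnd
      simp only [Bool.and_eq_true, beq_iff_eq] at hcnt
      obtain ⟨hab, hdist⟩ := hcnd
      have habL : (T.drop p).take (m - p) = T.drop m := by rw [← haL, ← hbL, hab]
      rw [haL] at hdist
      rw [set_len_gt_one] at hdist
      rw [PySem.Dict.getD_counter, PySem.Dict.getD_counter, PySem.Dict.getD_counter,
          PySem.Dict.getD_counter, haL] at hcnt
      simp only [true_iff]
      exact ⟨habL, hdist, by exact_mod_cast hcnt.1, by exact_mod_cast hcnt.2⟩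
    · simp only [false_iff]
      rintro ⟨-, -, hc1, hc2⟩
      apply hcnt
      rw [PySem.Dict.getD_counter, PySem.Dict.getD_counter, PySem.Dict.getD_counter,
          PySem.Dict.getD_counter, haL]
      simp only [Bool.and_eq_true, beq_iff_eq]
      exact ⟨by exact_mod_cast hc1, by exact_mod_cast hc2⟩
    · simp only [false_iff]
      rintro ⟨habL, hdist, -⟩
      apply hcnd
      simp only [Bool.and_eq_true, beq_iff_eq, decide_eq_true_eq]
      constructor
      · rw [← String.toList_inj, haL, hbL]
        exact habL
      · rw [haL, set_len_gt_one]
        exact hdist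
  -- the B side as a proposition
  have hB : (condB (posList arr) (prefC T 'R') (prefC T 'L') (prefC T 'D') (prefC T 'U')
        (nxtList T) (zfunc T.reverse) ((T.length : Nat) : Int) ((arr.length : Nat) : Int) i = true) ↔
      (((m : Int) - (p : Int) = (T.length : Int) - (m : Int))
        ∧ ¬ (1 ≤ (T.length : Int) - (m : Int)
             ∧ (((zfunc T.reverse).getD ((T.length : Int) - (m : Int)).toNat 0 : Nat) : Int)
                < (T.length : Int) - (m : Int))
        ∧ ((p : Int) < (m : Int) ∧ PySem.List.pyGetD (nxtList T) (p : Int) 0 < (m : Int))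
        ∧ (List.count 'R' ((T.drop p).take (m - p)) = List.count 'L' ((T.drop p).take (m - p))
           ∧ List.count 'D' ((T.drop p).take (m - p)) = List.count 'U' ((T.drop p).take (m - p)))) := by
    unfold condB
    rw [hmid]
    simp only [hpos_i, hpos_m]
    split_ifs with hc1 hc2 hc3 hc4
    · exact iff_of_false (by simp) (by rintro ⟨-, hn2, -⟩; exact hn2 hc2)
    · constructor
      · intro _
        rw [hcount 'R', hcount 'L', hcount 'D', hcount 'U'] at hc4
        exact ⟨hc1, hc2, hc3, by exact_mod_cast hc4.1, by exact_mod_cast hc4.2⟩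
      · intro _; rfl
    · refine iff_of_false (by simp) ?_
      rintro ⟨-, -, -, hd1, hd2⟩
      apply hc4
      rw [hcount 'R', hcount 'L', hcount 'D', hcount 'U']
      exact ⟨by exact_mod_cast hd1, by exact_mod_cast hd2⟩
    · exact iff_of_false (by simp) (by rintro ⟨-, -, hx, -⟩; exact hc3 hx)
    · exact iff_of_false (by simp) (by rintro ⟨hx, -⟩; exact hc1 hx)
  rw [Bool.eq_iff_iff, hA, hB]
  -- bridge the three guards
  constructor
  · rintro ⟨habL, hdist, hcnts⟩
    have hlen2 := (halves_iff T p m hpm hmL).mp habL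
    obtain ⟨hlen, hlcp⟩ := hlen2
    have hplt : p < m := by
      rcases (distinct_iff T p m hpm hmL).mp hdist with ⟨h1', h2'⟩
      exact h1'
    refine ⟨by omega, ?_, ?_, hcnts⟩
    · rintro ⟨hh1, hh2⟩
      have hh : 1 ≤ T.length - m := by omega
      have hcast : ((T.length : Int) - (m : Int)).toNat = T.length - m := by omega
      rw [hcast] at hh2
      rw [zfunc_correct T.reverse (T.length - m) hh (by rw [List.length_reverse]; omega),
          lcpAt] at hh2
      omega
    · rcases (distinct_iff T p m hpm hmL).mp hdist with ⟨h1', h2'⟩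
      refine ⟨by omega, ?_⟩
      rw [nxtList_eq T p (by omega)]
      omega
  · rintro ⟨hlen, hz, ⟨hplt, hnx⟩, hcnts⟩
    have hplt' : p < m := by omega
    rw [nxtList_eq T p (by omega)] at hnx
    have hdist : ∃ x ∈ (T.drop p).take (m - p), ∃ y ∈ (T.drop p).take (m - p), x ≠ y :=
      (distinct_iff T p m hpm hmL).mpr ⟨hplt', by omega⟩
    have hlcp : T.length - m ≤ lcp T.reverse (T.reverse.drop (T.length - m)) := by
      by_cases hh0 : T.length - m = 0
      · rw [hh0]; omega
      · have hh1 : 1 ≤ T.length - m := by omega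
        have hcast : ((T.length : Int) - (m : Int)).toNat = T.length - m := by omega
        rw [hcast, zfunc_correct T.reverse (T.length - m) hh1
            (by rw [List.length_reverse]; omega)] at hz
        push_neg at hz
        have := hz (by omega)
        rw [lcpAt] at this
        omega
    have habL : (T.drop p).take (m - p) = T.drop m :=
      (halves_iff T p m hpm hmL).mpr ⟨by omega, hlcp⟩
    exact ⟨habL, hdist, hcnts⟩

theorem main_eq (arr : List String) : is_repeat arr = is_repeat_alt arr := by
  have hS : (PySem.Str.join "" arr).toList = flatT arr := toList_joinStr arr
  simp only [is_repeat, is_repeat_alt, PySem.List.len_eq, PySem.Str.len_eq,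
    loopA_eq_any, loopB_eq_any, hS]
  have hm : PySem.Int.mod ((arr.length : Int)) 2 = (arr.length : Int) % 2 :=
    PySem.Int.mod_eq_emod_of_pos (by norm_num)
  rw [Bool.eq_iff_iff]
  simp only [List.any_eq_true]
  constructor
  · rintro ⟨i, hmem, hci⟩
    rw [PySem.List.mem_pyRange_one] at hmem
    have hpar : PySem.Int.mod ((arr.length : Int) - i) 2 = 0 := by
      rcases PySem.Int.mod_two_eq ((arr.length : Int) - i) with hp | hp
      · exact hp
      · exfalso
        unfold condA at hci
        rw [hp] at hci
        simp at hci
    have hd := (PySem.Int.mod_eq_zero_iff_dvd _ _).mp hpar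
    refine ⟨i, ?_, ?_⟩
    · rw [PySem.List.mem_pyRange_iff_of_pos (by norm_num), hm]
      refine ⟨by omega, hmem.2, by omega⟩
    · rw [← condA_eq_condB arr i hmem.1 hmem.2 hpar]
      exact hci
  · rintro ⟨i, hmem, hci⟩
    rw [PySem.List.mem_pyRange_iff_of_pos (by norm_num), hm] at hmem
    have h0 : 0 ≤ i := by omega
    have hpar : PySem.Int.mod ((arr.length : Int) - i) 2 = 0 := by
      rw [(PySem.Int.mod_eq_zero_iff_dvd _ _)]
      omega
    refine ⟨i, ?_, ?_⟩
    · rw [PySem.List.mem_pyRange_one]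
      exact ⟨h0, hmem.2.1⟩
    · rw [condA_eq_condB arr i h0 hmem.2.1 hpar]
      exact hci

-- ===== VERDICT (by name: the statement is the Claim_ definition above) =====
theorem is_repeat_spec : Claim_equal_is_repeat := by
  intro arr _
  unfold Spec_is_repeat
  exact main_eq arr
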